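-- pv_equiv track=rewrite | github.com/ArchExalt/subdomain-finder-python | subdomain_finder.py | generate_domain_names
-- ===== SOURCE A (Python) =====
-- import itertools
--
-- def generate_domain_names(domain, max_len):
--     characters = 'abcdefghijklmnopqrstuvwxyz0123456789-'
--     domain_names = set()
--
--     for length in range(1, max_len + 1):
--         for combination in itertools.product(characters, repeat=length):
--             domain_name = ''.join(combination)
--             if '-' not in domain_name[0] and '-' not in domain_name[-1]: # ensure domain name doesn't start or end with '-'
--                 domain_names.add(f"{domain_name}.{domain}")
--
--     return domain_names
-- ===== SOURCE B (Python) =====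
-- import itertools
--
-- def generate_domain_names(domain, max_len):
--     full = 'abcdefghijklmnopqrstuvwxyz0123456789-'
--     edge = 'abcdefghijklmnopqrstuvwxyz0123456789'
--     domain_names = set()
--     for length in range(1, max_len + 1):
--         if length == 1:
--             for c in edge:
--                 domain_names.add(f"{c}.{domain}")
--         else:
--             for first in edge:
--                 for mid in itertools.product(full, repeat=length - 2):
--                     middle = ''.join(mid)
--                     for last in edge:
--                         domain_names.add(f"{first}{middle}{last}.{domain}")
--     return domain_names
-- ===== Notes on version B (the rewrite author's own statement) =====
-- stated objective: alternative
-- what changed: B generates only valid names directly (length-1 from the dash-free alphabet; longer names as dash-free first/last characters around an interior product over the full alphabet) instead of enumerating all 37^L tuples and filtering out those that start or end with '-'.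
import Mathlib
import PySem

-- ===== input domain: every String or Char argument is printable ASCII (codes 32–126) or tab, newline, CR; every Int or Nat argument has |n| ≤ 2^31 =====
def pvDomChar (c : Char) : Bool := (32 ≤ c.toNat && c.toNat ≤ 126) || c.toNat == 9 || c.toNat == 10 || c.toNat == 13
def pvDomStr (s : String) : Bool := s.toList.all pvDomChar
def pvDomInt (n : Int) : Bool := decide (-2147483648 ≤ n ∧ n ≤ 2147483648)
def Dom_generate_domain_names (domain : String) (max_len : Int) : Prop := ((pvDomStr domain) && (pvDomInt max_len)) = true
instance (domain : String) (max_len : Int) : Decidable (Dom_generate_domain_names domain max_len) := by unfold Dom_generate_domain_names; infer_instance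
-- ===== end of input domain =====

-- B generates only valid names directly (dash-free first/last characters around an interior product
-- over the full alphabet) instead of enumerating every tuple and filtering; same return value, alternative algorithm.

-- itertools.product(cs, repeat=n) ported by hand (exact: CPython's order — leftmost position varies slowest),
-- used by both ports since both Pythons call it.
def pvProdRep (cs : List Char) : Nat → List (List Char)
  | 0 => [[]]
  | n + 1 => cs.flatMap (fun c => (pvProdRep cs n).map (fun t => c :: t))

-- ===== PORT A =====
def pvCharsA : List Char := "abcdefghijklmnopqrstuvwxyz0123456789-".toList

def generate_domain_names (domain : String) (max_len : Int) : List String :=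
  -- f"{domain_name}.{domain}" built on the List Char side (String.ofList), exact for string concatenation
  (PySem.List.pyRange 1 (max_len + 1) 1).foldl (fun domain_names length =>
    (pvProdRep pvCharsA length.toNat).foldl (fun s comb =>
      -- '-' not in domain_name[0] / domain_name[-1]: the slices are single chars, so this is head/last ≠ '-'
      if (comb.head? != some '-') && (comb.getLast? != some '-') then
        PySem.Set.add s (String.ofList (comb ++ '.' :: domain.toList))
      else s) domain_names) PySem.Set.empty

-- ===== PORT B =====
def pvFullB : List Char := "abcdefghijklmnopqrstuvwxyz0123456789-".toList
def pvEdgeB : List Char := "abcdefghijklmnopqrstuvwxyz0123456789".toList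

def generate_domain_names_alt (domain : String) (max_len : Int) : List String :=
  (PySem.List.pyRange 1 (max_len + 1) 1).foldl (fun domain_names length =>
    if length == 1 then
      pvEdgeB.foldl (fun s c => PySem.Set.add s (String.ofList (c :: '.' :: domain.toList))) domain_names
    else
      pvEdgeB.foldl (fun s first =>
        (pvProdRep pvFullB (length - 2).toNat).foldl (fun s mid =>
          pvEdgeB.foldl (fun s last =>
            PySem.Set.add s (String.ofList (first :: (mid ++ last :: '.' :: domain.toList)))) s) s) domain_names)
    PySem.Set.empty

-- ===== PRECONDITION & SPEC =====
def Spec_generate_domain_names (domain : String) (max_len : Int) (out : List String) : Prop := out = generate_domain_names_alt domain max_len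
instance (domain : String) (max_len : Int) (out : List String) : Decidable (Spec_generate_domain_names domain max_len out) := by unfold Spec_generate_domain_names; infer_instance

-- ===== CLAIM (what is proved, stated in full; the proofs are below) =====
def Claim_equal_generate_domain_names : Prop := ∀ (domain : String) (max_len : Int), Dom_generate_domain_names domain max_len → Spec_generate_domain_names domain max_len (generate_domain_names domain max_len)

-- ===== LEMMAS AND PROOFS =====

lemma pv_full_eq : pvCharsA = pvFullB := rfl

lemma pv_mem_prodRep_ne_nil {cs : List Char} {n : Nat} {x : List Char}
    (h : x ∈ pvProdRep cs (n + 1)) : x ≠ [] := by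
  simp only [pvProdRep, List.mem_flatMap, List.mem_map] at h
  obtain ⟨c, -, t, -, rfl⟩ := h
  simp

-- filtering "does not end with '-'" out of the full product = full product one shorter × a dash-free last char
lemma pv_edge_ne_dash : ∀ c ∈ pvEdgeB, (c != '-') = true := by
  have h : pvEdgeB.all (fun c => c != '-') = true := by decide
  exact fun c hc => List.all_eq_true.mp h c hc

set_option maxRecDepth 16384 in
lemma pv_filter_last (n : Nat) :
    (pvProdRep pvFullB (n + 1)).filter (fun c => c.getLast? != some '-')
      = (pvProdRep pvFullB n).flatMap (fun m => pvEdgeB.map (fun z => m ++ [z])) := by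
  induction n with
  | zero => decide
  | succ n ih =>
    show (pvFullB.flatMap fun c => (pvProdRep pvFullB (n+1)).map (fun t => c :: t)).filter _ = _
    rw [List.filter_flatMap]
    have hstep : ∀ c ∈ pvFullB,
        ((pvProdRep pvFullB (n+1)).map (fun t => c :: t)).filter (fun l => l.getLast? != some '-')
          = ((pvProdRep pvFullB n).flatMap (fun m => pvEdgeB.map (fun z => m ++ [z]))).map (fun t => c :: t) := by
      intro c _
      rw [List.filter_map, List.filter_congr (q := fun l => l.getLast? != some '-'), ih]
      intro x hx
      obtain ⟨y, t, rfl⟩ : ∃ y t, x = y :: t := by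
        rcases x with _ | ⟨y, t⟩
        · exact absurd rfl (pv_mem_prodRep_ne_nil hx)
        · exact ⟨y, t, rfl⟩
      simp [List.getLast?_cons_cons]
    rw [List.flatMap_congr hstep]
    show _ = (pvFullB.flatMap fun c => (pvProdRep pvFullB n).map (fun t => c :: t)).flatMap _
    simp [List.flatMap_assoc, List.map_flatMap, List.flatMap_map, List.map_map, Function.comp_def]

-- the per-length list A keeps (length n+2) is exactly the structured list B generates
lemma pv_filter_both (n : Nat) :
    (pvProdRep pvFullB (n + 2)).filter
        (fun c => (c.head? != some '-') && (c.getLast? != some '-'))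
      = pvEdgeB.flatMap (fun a => (pvProdRep pvFullB n).flatMap (fun m => pvEdgeB.map (fun z => a :: m ++ [z]))) := by
  have hsplit : (pvProdRep pvFullB (n + 2)).filter
        (fun c => (c.head? != some '-') && (c.getLast? != some '-'))
      = ((pvProdRep pvFullB (n + 2)).filter (fun c => c.head? != some '-')).filter
          (fun c => c.getLast? != some '-') := by
    rw [List.filter_filter]
    exact List.filter_congr (fun x _ => (Bool.and_comm _ _))
  rw [hsplit]
  -- head filter: keep exactly the dash-free first characters
  have hhead : (pvProdRep pvFullB (n + 2)).filter (fun c => c.head? != some '-')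
      = pvEdgeB.flatMap (fun a => (pvProdRep pvFullB (n+1)).map (fun t => a :: t)) := by
    show (pvFullB.flatMap fun c => (pvProdRep pvFullB (n+1)).map (fun t => c :: t)).filter _ = _
    rw [List.filter_flatMap]
    generalize (pvProdRep pvFullB (n+1)) = X
    have hstep : ∀ c ∈ pvFullB,
        (X.map (fun t => c :: t)).filter (fun l => l.head? != some '-')
          = if c != '-' then X.map (fun t => c :: t) else [] := by
      intro c _
      rw [List.filter_map]
      by_cases hc : c = '-'
      · subst hc
        have hconst : ((fun (l : List Char) => l.head? != some '-') ∘ (fun t => '-' :: t))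
            = fun _ => false := by funext t; simp
        rw [hconst, List.filter_false]
        simp
      · have hconst : ((fun (l : List Char) => l.head? != some '-') ∘ (fun t => c :: t))
            = fun _ => true := by funext t; simp [hc]
        rw [hconst, List.filter_true, if_pos (by simpa using hc)]
    rw [List.flatMap_congr hstep]
    have hfull : pvFullB = pvEdgeB ++ ['-'] := rfl
    rw [hfull, List.flatMap_append]
    have hd : ∀ c ∈ pvEdgeB, (c != '-') = true := pv_edge_ne_dash
    have hedge : ∀ c ∈ pvEdgeB,
        (if c != '-' then X.map (fun t => c :: t) else []) = X.map (fun t => c :: t) := by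
      intro c hc; rw [hd c hc]; simp
    rw [List.flatMap_congr hedge]
    simp
  rw [hhead, List.filter_flatMap]
  have h2 : ∀ a ∈ pvEdgeB,
      ((pvProdRep pvFullB (n+1)).map (fun t => a :: t)).filter (fun l => l.getLast? != some '-')
        = (pvProdRep pvFullB n).flatMap (fun m => pvEdgeB.map (fun z => a :: m ++ [z])) := by
    intro a _
    rw [List.filter_map, List.filter_congr (q := fun l => l.getLast? != some '-')]
    · rw [pv_filter_last]
      simp [List.map_flatMap, List.map_map, Function.comp_def]
    · intro x hx
      obtain ⟨y, t, rfl⟩ : ∃ y t, x = y :: t := by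
        rcases x with _ | ⟨y, t⟩
        · exact absurd rfl (pv_mem_prodRep_ne_nil hx)
        · exact ⟨y, t, rfl⟩
      simp [List.getLast?_cons_cons]
  exact List.flatMap_congr h2

set_option maxRecDepth 16384 in
lemma pv_step_eq (domain : String) (s : PySem.Set String) (length : Int) (h1 : 1 ≤ length) :
    (pvProdRep pvCharsA length.toNat).foldl (fun s comb =>
      if (comb.head? != some '-') && (comb.getLast? != some '-') then
        PySem.Set.add s (String.ofList (comb ++ '.' :: domain.toList))
      else s) s
    = if length == 1 then
        pvEdgeB.foldl (fun s c => PySem.Set.add s (String.ofList (c :: '.' :: domain.toList))) s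
      else
        pvEdgeB.foldl (fun s first =>
          (pvProdRep pvFullB (length - 2).toNat).foldl (fun s mid =>
            pvEdgeB.foldl (fun s last =>
              PySem.Set.add s (String.ofList (first :: (mid ++ last :: '.' :: domain.toList)))) s) s) s := by
  rw [PySem.List.foldl_if_eq_foldl_filter, pv_full_eq]
  by_cases hone : length = 1
  · subst hone
    simp only [BEq.rfl, if_pos]
    have hfil : (pvProdRep pvFullB (Int.toNat 1)).filter
        (fun c => (c.head? != some '-') && (c.getLast? != some '-')) = pvEdgeB.map (fun c => [c]) := by
      decide
    rw [hfil, List.foldl_map]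
    exact PySem.List.foldl_congr_mem _ _ _ _ (fun acc c hc => by simp)
  · have hlen : (length == 1) = false := by simpa using hone
    rw [hlen, if_neg (by simp)]
    obtain ⟨n, hn, hn2⟩ : ∃ n : Nat, length.toNat = n + 2 ∧ (length - 2).toNat = n := by
      refine ⟨(length - 2).toNat, by omega, rfl⟩
    rw [hn, hn2, pv_filter_both]
    rw [List.foldl_flatMap]
    refine PySem.List.foldl_congr_mem _ _ _ _ (fun acc a _ => ?_)
    rw [List.foldl_flatMap]
    refine PySem.List.foldl_congr_mem _ _ _ _ (fun acc2 m _ => ?_)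
    rw [List.foldl_map]
    refine PySem.List.foldl_congr_mem _ _ _ _ (fun acc3 z _ => ?_)
    simp

-- ===== VERDICT (by name: the statement is the Claim_ definition above) =====
theorem generate_domain_names_spec : Claim_equal_generate_domain_names := by
  intro domain max_len _
  unfold Spec_generate_domain_names generate_domain_names generate_domain_names_alt
  refine PySem.List.foldl_congr_mem _ _ _ _ (fun acc length hmem => ?_)
  have h1 : 1 ≤ length := ((PySem.List.mem_pyRange_one).1 hmem).1
  exact pv_step_eq domain acc length h1
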